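-- pv_equiv track=rewrite | github.com/rvalen1123/memibrium | scripts/phase_b_extract_probe_subset.py | pick_balanced
-- ===== SOURCE A (Python) =====
-- from collections import defaultdict
--
-- def pick_balanced(rows_by_strategy: dict[str, list[dict]], per_category_per_strategy: int) -> list[dict]:
--     selected = []
--     for strategy in sorted(rows_by_strategy):
--         by_cat = defaultdict(list)
--         for row in rows_by_strategy[strategy]:
--             by_cat[row["category"]].append(row)
--         for category in sorted(by_cat):
--             if category == "5":
--                 # Published AP baselines are categories 1-4 only. Keep category-5 explicit.
--                 continue
--             selected.extend(by_cat[category][:per_category_per_strategy])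
--     return selected
-- ===== SOURCE B (Python) =====
-- def pick_balanced(rows_by_strategy: dict[str, list[dict]], per_category_per_strategy: int) -> list[dict]:
--     def picks(rows):
--         cats = sorted({r["category"] for r in rows})
--         return [r for c in cats if c != "5"
--                   for r in [x for x in rows if x["category"] == c][:per_category_per_strategy]]
--     return [row for strategy in sorted(rows_by_strategy)
--                 for row in picks(rows_by_strategy[strategy])]
-- ===== Notes on version B (the rewrite author's own statement) =====
-- stated objective: simpler
-- what changed: Replaces the defaultdict bucketing pass per strategy by a sorted set of distinct categories with a per-category filter-and-slice, expressed as one flat comprehension pipeline instead of nested loops mutating an accumulator.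
import Mathlib
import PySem

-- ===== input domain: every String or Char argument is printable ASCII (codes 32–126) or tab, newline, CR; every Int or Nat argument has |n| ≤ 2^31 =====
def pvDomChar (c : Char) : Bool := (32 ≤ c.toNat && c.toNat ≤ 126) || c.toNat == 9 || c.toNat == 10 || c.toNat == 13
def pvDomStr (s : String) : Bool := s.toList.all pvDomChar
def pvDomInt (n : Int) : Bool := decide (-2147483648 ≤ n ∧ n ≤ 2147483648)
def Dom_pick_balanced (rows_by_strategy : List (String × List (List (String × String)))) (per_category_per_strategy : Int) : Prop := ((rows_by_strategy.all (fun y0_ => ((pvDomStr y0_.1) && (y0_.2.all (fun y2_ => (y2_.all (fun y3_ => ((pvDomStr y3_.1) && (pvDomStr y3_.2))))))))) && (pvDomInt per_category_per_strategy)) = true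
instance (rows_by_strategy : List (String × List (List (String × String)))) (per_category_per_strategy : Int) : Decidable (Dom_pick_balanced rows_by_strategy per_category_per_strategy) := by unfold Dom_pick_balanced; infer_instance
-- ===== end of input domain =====

-- B replaces A's defaultdict bucketing pass by a sorted distinct-category set with a per-category
-- filter, as one flat comprehension pipeline (objective: simpler; same results, no speed claim).

-- shared helper: row["category"] as a total function; exact under Pre_ (the row contains the key)
def pvCat (row : List (String × String)) : String :=
  ((PySem.Dict.mk row).get? "category").getD ""

-- ===== PORT A =====
def pick_balanced (rows_by_strategy : List (String × List (List (String × String)))) (per_category_per_strategy : Int) : List (List (String × String)) :=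
  (PySem.List.sorted (rows_by_strategy.map Prod.fst) (fun s => s) false).foldl
    (fun selected strategy =>
      -- rows_by_strategy[strategy]: strategy is a key of the dict, so the lookup always succeeds
      let rows := ((PySem.Dict.mk rows_by_strategy).get? strategy).getD []
      let by_cat := rows.foldl
        (fun bc row => bc.modify (pvCat row) [] (fun v => v ++ [row])) PySem.Dict.empty
      (PySem.List.sorted by_cat.keys (fun s => s) false).foldl
        (fun sel category =>
          if category = "5" then sel
          else sel ++ PySem.List.slice (by_cat.getD category []) none (some per_category_per_strategy))
        selected)
    []

-- ===== PORT B =====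
-- picks(rows) from Source B
def pvPicks (rows : List (List (String × String))) (per_category_per_strategy : Int) : List (List (String × String)) :=
  (PySem.List.sorted (PySem.Set.ofList (rows.map pvCat)) (fun s => s) false).flatMap
    (fun c => if c ≠ "5"
      then PySem.List.slice (rows.filter (fun x => pvCat x == c)) none (some per_category_per_strategy)
      else [])

def pick_balanced_alt (rows_by_strategy : List (String × List (List (String × String)))) (per_category_per_strategy : Int) : List (List (String × String)) :=
  (PySem.List.sorted (rows_by_strategy.map Prod.fst) (fun s => s) false).flatMap
    (fun strategy =>
      pvPicks (((PySem.Dict.mk rows_by_strategy).get? strategy).getD []) per_category_per_strategy)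

-- ===== PRECONDITION & SPEC =====
-- Pre_ excludes exactly the inputs on which A raises KeyError: a row without the "category" key.
def Pre_pick_balanced (rows_by_strategy : List (String × List (List (String × String)))) (per_category_per_strategy : Int) : Prop :=
  ∀ p ∈ rows_by_strategy, ∀ row ∈ p.2, (row.map Prod.fst).contains "category" = true
instance (rows_by_strategy : List (String × List (List (String × String)))) (per_category_per_strategy : Int) : Decidable (Pre_pick_balanced rows_by_strategy per_category_per_strategy) := by unfold Pre_pick_balanced; infer_instance

def pvWitness_pick_balanced : (List (String × List (List (String × String)))) × Int :=
  ([("acid", [[("category", "1"), ("q", "a")], [("category", "1")], [("category", "5")]]),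
    ("base", [[("category", "2")]])], 1)

def Spec_pick_balanced (rows_by_strategy : List (String × List (List (String × String)))) (per_category_per_strategy : Int) (out : List (List (String × String))) : Prop := out = pick_balanced_alt rows_by_strategy per_category_per_strategy
instance (rows_by_strategy : List (String × List (List (String × String)))) (per_category_per_strategy : Int) (out : List (List (String × String))) : Decidable (Spec_pick_balanced rows_by_strategy per_category_per_strategy out) := by unfold Spec_pick_balanced; infer_instance

-- ===== CLAIM (what is proved, stated in full; the proofs are below) =====
def Claim_equal_pick_balanced : Prop := ∀ (rows_by_strategy : List (String × List (List (String × String)))) (per_category_per_strategy : Int), Dom_pick_balanced rows_by_strategy per_category_per_strategy → Pre_pick_balanced rows_by_strategy per_category_per_strategy → Spec_pick_balanced rows_by_strategy per_category_per_strategy (pick_balanced rows_by_strategy per_category_per_strategy)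

-- ===== LEMMAS AND PROOFS =====

-- A's defaultdict, built over rows, has exactly the distinct categories (first occurrences) as keys
lemma by_cat_keys (rows : List (List (String × String))) :
    (rows.foldl (fun bc row => bc.modify (pvCat row) [] (fun v => v ++ [row])) PySem.Dict.empty).keys
      = PySem.Set.ofList (rows.map pvCat) := by
  rw [PySem.Dict.keys_foldl_modify_key rows pvCat [] (fun _ row => fun v => v ++ [row]) PySem.Dict.empty]
  simp [PySem.Dict.keys_empty, PySem.Set.update, PySem.Set.ofList]

-- A's bucket at category c is the filter of rows by that category
lemma by_cat_getD (rows : List (List (String × String))) (c : String) :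
    (rows.foldl (fun bc row => bc.modify (pvCat row) [] (fun v => v ++ [row])) PySem.Dict.empty).getD c []
      = rows.filter (fun x => pvCat x == c) := by
  have h : rows.foldl (fun bc row => bc.modify (pvCat row) [] (fun v => v ++ [row])) PySem.Dict.empty
      = (rows.map (fun r => (pvCat r, r))).foldl
          (fun d p => d.modify p.1 [] (fun v => v ++ [p.2])) PySem.Dict.empty := by
    rw [List.foldl_map]
  rw [h, PySem.Dict.getD_foldl_modify_append, PySem.Dict.getD_empty]
  simp [List.filter_map, Function.comp_def, List.map_map]

-- A's inner category loop, on any start accumulator, appends exactly pvPicks rows k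
lemma inner_loop (rows : List (List (String × String))) (k : Int) (sel : List (List (String × String))) :
    (PySem.List.sorted
        (rows.foldl (fun bc row => bc.modify (pvCat row) [] (fun v => v ++ [row])) PySem.Dict.empty).keys
        (fun s => s) false).foldl
      (fun sel category =>
        if category = "5" then sel
        else sel ++ PySem.List.slice
          ((rows.foldl (fun bc row => bc.modify (pvCat row) [] (fun v => v ++ [row])) PySem.Dict.empty).getD category [])
          none (some k))
      sel
    = sel ++ pvPicks rows k := by
  rw [by_cat_keys]
  have hfn : (fun (sel : List (List (String × String))) category =>
        if category = "5" then sel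
        else sel ++ PySem.List.slice
          ((rows.foldl (fun bc row => bc.modify (pvCat row) [] (fun v => v ++ [row])) PySem.Dict.empty).getD category [])
          none (some k))
      = (fun sel c => sel ++ (if c ≠ "5"
          then PySem.List.slice (rows.filter (fun x => pvCat x == c)) none (some k) else [])) := by
    funext sel c
    rw [by_cat_getD]
    by_cases h : c = "5" <;> simp [h]
  rw [hfn, PySem.List.foldl_append_eq_flatMap]
  rfl

-- ===== VERDICT (by name: the statement is the Claim_ definition above) =====
theorem pick_balanced_spec : Claim_equal_pick_balanced := by
  intro d k _ _
  unfold Spec_pick_balanced pick_balanced pick_balanced_alt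
  have hfn : (fun (selected : List (List (String × String))) strategy =>
        (PySem.List.sorted
            ((((PySem.Dict.mk d).get? strategy).getD []).foldl
              (fun bc row => bc.modify (pvCat row) [] (fun v => v ++ [row])) PySem.Dict.empty).keys
            (fun s => s) false).foldl
          (fun sel category =>
            if category = "5" then sel
            else sel ++ PySem.List.slice
              (((((PySem.Dict.mk d).get? strategy).getD []).foldl
                (fun bc row => bc.modify (pvCat row) [] (fun v => v ++ [row])) PySem.Dict.empty).getD category [])
              none (some k))
          selected)
      = (fun selected strategy =>
          selected ++ pvPicks (((PySem.Dict.mk d).get? strategy).getD []) k) := by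
    funext selected strategy
    exact inner_loop (((PySem.Dict.mk d).get? strategy).getD []) k selected
  show (PySem.List.sorted (d.map Prod.fst) (fun s => s) false).foldl _ [] = _
  rw [hfn, PySem.List.foldl_append_eq_flatMap]
  rfl
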